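-- pv_equiv track=rewrite | github.com/yeoseojeong/python_study | programmers/가운데 글자 가져오기.py | solution
-- ===== SOURCE A (Python) =====
-- def solution(s):
--     answer = ''
--
--     for i in range(len(s)):
--         if (len(s)%2==0):
--             answer+=(s[(len(s)//2)-1])
--             answer+=(s[len(s)//2])
--             break
--         else:
--             answer+=(s[len(s)//2])
--             break
--
--     return ''.join(answer)
-- ===== SOURCE B (Python) =====
-- def solution(s):
--     n = len(s)
--     return s[(n - 1) // 2 : n // 2 + 1]
-- ===== Notes on version B (the rewrite author's own statement) =====
-- stated objective: simpler
-- what changed: Replaces the loop-with-break and parity branches by a single branchless slice s[(n-1)//2 : n//2+1] that yields one char for odd n, two for even n.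
import Mathlib
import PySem

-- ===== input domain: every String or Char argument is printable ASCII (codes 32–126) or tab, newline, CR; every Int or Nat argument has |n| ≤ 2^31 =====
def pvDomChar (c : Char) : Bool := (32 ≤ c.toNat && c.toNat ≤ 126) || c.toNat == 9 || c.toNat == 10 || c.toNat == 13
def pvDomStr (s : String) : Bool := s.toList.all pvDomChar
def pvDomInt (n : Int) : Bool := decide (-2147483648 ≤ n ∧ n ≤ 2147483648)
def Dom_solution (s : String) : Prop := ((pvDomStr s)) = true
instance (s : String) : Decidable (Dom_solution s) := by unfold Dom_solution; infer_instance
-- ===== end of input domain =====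

-- B replaces A's loop-with-break and parity branches by one branchless slice; return values agree on all strings.

-- ===== PORT A =====
-- A's for-loop over range(len(s)) executes its body at most once (both branches break);
-- ported as a match on whether the range is empty, then the same branch in the same order.
-- Indices are always in range when reached, so pyGetD's default is never used.
def solution (s : String) : String :=
  let cs := s.toList
  let n : Int := cs.length
  match PySem.List.pyRange 0 n 1 with
  | [] => ""
  | _ :: _ =>
    if PySem.Int.mod n 2 = 0 then
      String.ofList ([] ++ [PySem.List.pyGetD cs (PySem.Int.floordiv n 2 - 1) ' ']
                    ++ [PySem.List.pyGetD cs (PySem.Int.floordiv n 2) ' '])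
    else
      String.ofList ([] ++ [PySem.List.pyGetD cs (PySem.Int.floordiv n 2) ' '])

-- ===== PORT B =====
def solution_alt (s : String) : String :=
  let cs := s.toList
  let n : Int := cs.length
  String.ofList (PySem.List.slice cs (some (PySem.Int.floordiv (n - 1) 2)) (some (PySem.Int.floordiv n 2 + 1)))

-- ===== PRECONDITION & SPEC =====
def Spec_solution (s : String) (out : String) : Prop := out = solution_alt s
instance (s : String) (out : String) : Decidable (Spec_solution s out) := by unfold Spec_solution; infer_instance

-- ===== CLAIM (what is proved, stated in full; the proofs are below) =====
def Claim_equal_solution : Prop := ∀ (s : String), Dom_solution s → Spec_solution s (solution s)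

-- ===== LEMMAS AND PROOFS =====

-- The core list-level fact: A's picked characters equal B's slice, for any nonempty list.
theorem mid_slice_eq (cs : List Char) (h : cs ≠ []) :
    PySem.List.slice cs (some (PySem.Int.floordiv ((cs.length : Int) - 1) 2))
                        (some (PySem.Int.floordiv (cs.length : Int) 2 + 1)) =
    (if PySem.Int.mod (cs.length : Int) 2 = 0 then
      [PySem.List.pyGetD cs (PySem.Int.floordiv (cs.length : Int) 2 - 1) ' ',
       PySem.List.pyGetD cs (PySem.Int.floordiv (cs.length : Int) 2) ' ']
    else
      [PySem.List.pyGetD cs (PySem.Int.floordiv (cs.length : Int) 2) ' ']) := by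
  have hm : 0 < cs.length := List.length_pos_of_ne_nil h
  have h2 : (0:Int) < 2 := by norm_num
  rw [PySem.Int.floordiv_eq_ediv_of_pos h2, PySem.Int.floordiv_eq_ediv_of_pos h2,
      PySem.Int.mod_eq_emod_of_pos h2]
  have ha : (0:Int) ≤ ((cs.length : Int) - 1) / 2 := by
    apply Int.ediv_nonneg <;> omega
  have hb : (0:Int) ≤ (cs.length : Int) / 2 + 1 := by
    have := Int.ediv_nonneg (a := (cs.length : Int)) (b := 2) (by omega) (by omega)
    omega
  rw [PySem.List.slice_toNat cs ha hb]
  rcases Int.even_or_odd (cs.length : Int) with ⟨k, hk⟩ | ⟨k, hk⟩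
  · -- even length, length = 2k with k ≥ 1
    have hk1 : 1 ≤ k := by omega
    have hdiv : ((cs.length : Int)) / 2 = k := by omega
    have hdiv1 : ((cs.length : Int) - 1) / 2 = k - 1 := by omega
    have hmod : ((cs.length : Int)) % 2 = 0 := by omega
    rw [hdiv, hdiv1, hmod]
    rw [if_pos rfl]
    have hlt : (k - 1).toNat + 1 < cs.length := by omega
    have hlt' : (k - 1).toNat < cs.length := by omega
    rw [PySem.List.pyGetD_eq_getElem cs (i := k - 1) ' ' (by omega) (by omega),
        PySem.List.pyGetD_eq_getElem cs (i := k) ' ' (by omega) (by omega)]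
    have htn : (k + 1).toNat - (k - 1).toNat = 2 := by omega
    have hk2 : k.toNat = (k-1).toNat + 1 := by omega
    rw [htn]
    simp only [hk2]
    rw [← List.getElem_cons_drop (as := cs) (i := (k-1).toNat) hlt',
        ← List.getElem_cons_drop (as := cs) (i := (k-1).toNat + 1) hlt]
    rfl
  · -- odd length, length = 2k+1
    have hk0 : 0 ≤ k := by omega
    have hdiv : ((cs.length : Int)) / 2 = k := by omega
    have hdiv1 : ((cs.length : Int) - 1) / 2 = k := by omega
    have hmod : ((cs.length : Int)) % 2 = 1 := by omega
    rw [hdiv, hdiv1, hmod]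
    simp only [if_neg (by norm_num : (1:Int) ≠ 0)]
    have hlt : k.toNat < cs.length := by omega
    rw [PySem.List.pyGetD_eq_getElem cs (i := k) ' ' hk0 (by omega)]
    have htn : (k + 1).toNat - k.toNat = 1 := by omega
    rw [htn, ← List.getElem_cons_drop (as := cs) (i := k.toNat) hlt]
    rfl

-- ===== VERDICT (by name: the statement is the Claim_ definition above) =====
theorem solution_spec : Claim_equal_solution := by
  intro s _
  unfold Spec_solution solution solution_alt
  by_cases h : s.toList = []
  · simp [h, PySem.List.pyRange_one_eq_nil, PySem.List.slice, PySem.List.clampIdx]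
  · have hm : 0 < s.toList.length := List.length_pos_of_ne_nil h
    have hcons : PySem.List.pyRange 0 (s.toList.length : Int) 1 =
        0 :: PySem.List.pyRange 1 (s.toList.length : Int) 1 :=
      PySem.List.pyRange_one_cons (by exact_mod_cast hm)
    simp only [hcons]
    rw [mid_slice_eq s.toList h]
    split_ifs <;> simp
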